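-- pv_equiv track=rewrite | github.com/Xavier-Lam/wechat-django | wechat_django/models/permission.py | get_require_perm_names
-- ===== SOURCE A (Python) =====
-- permission_required = {
--     "material": (
--         "article",
--         "wechat_django.delete_material"
--     ),
--     "article": (
--         "wechat_django.delete_article",
--     ),
--     "menu": (
--         "wechat_django.delete_menu",
--     ),
--     "messagehandler": (
--         "wechat_django.delete_messagehandler",
--         "wechat_django.add_reply",
--         "wechat_django.change_reply",
--         "wechat_django.delete_reply",
--         "wechat_django.add_rule",
--         "wechat_django.change_rule",
--         "wechat_django.delete_rule"
--     )
-- }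
--
-- def get_require_perm_names(appname, permission=None):
--     """获取依赖的django权限"""
--     rv = set()
--     perms = (permission_required.get(permission, []) if permission
--         else permission_required.keys())
--     for perm in perms:
--         if perm.startswith("wechat_django."):
--             rv.add(perm)
--         else:
--             rv.update(get_require_perm_names(appname, perm))
--     return rv
-- ===== SOURCE B (Python) =====
-- permission_required = {
--     "material": (
--         "article",
--         "wechat_django.delete_material"
--     ),
--     "article": (
--         "wechat_django.delete_article",
--     ),
--     "menu": (
--         "wechat_django.delete_menu",
--     ),
--     "messagehandler": (
--         "wechat_django.delete_messagehandler",
--         "wechat_django.add_reply",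
--         "wechat_django.change_reply",
--         "wechat_django.delete_reply",
--         "wechat_django.add_rule",
--         "wechat_django.change_rule",
--         "wechat_django.delete_rule"
--     )
-- }
--
-- def get_require_perm_names(appname, permission=None):
--     """获取依赖的django权限 (iterative worklist instead of recursion)"""
--     seeds = (permission_required.get(permission, []) if permission
--         else permission_required.keys())
--     rv = set()
--     stack = list(seeds)[::-1]
--     while stack:
--         name = stack.pop()
--         if name.startswith("wechat_django."):
--             rv.add(name)
--         else:
--             stack.extend(reversed(permission_required.get(name, [])))
--     return rv
-- ===== Notes on version B (the rewrite author's own statement) =====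
-- stated objective: alternative
-- what changed: Replaced the recursive set-union expansion with an iterative explicit-stack (worklist) DFS that accumulates the result in a single loop.
import Mathlib
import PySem

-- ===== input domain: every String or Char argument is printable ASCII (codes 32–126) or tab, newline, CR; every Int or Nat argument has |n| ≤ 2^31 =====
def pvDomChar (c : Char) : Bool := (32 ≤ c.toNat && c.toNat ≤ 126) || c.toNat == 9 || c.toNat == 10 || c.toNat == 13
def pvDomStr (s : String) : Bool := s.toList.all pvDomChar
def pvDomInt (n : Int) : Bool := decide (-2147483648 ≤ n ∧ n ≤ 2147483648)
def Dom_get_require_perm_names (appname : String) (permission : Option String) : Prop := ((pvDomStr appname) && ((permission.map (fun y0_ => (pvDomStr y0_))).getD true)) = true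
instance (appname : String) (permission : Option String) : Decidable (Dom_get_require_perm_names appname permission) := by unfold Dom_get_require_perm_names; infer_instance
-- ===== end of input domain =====

-- B replaces A's recursive set-union expansion by an iterative explicit-stack DFS; return value only (no speed claim).

-- ===== PORT A =====
def permission_required : PySem.Dict String (List String) := PySem.Dict.ofList
  [ ("material", ["article", "wechat_django.delete_material"]),
    ("article", ["wechat_django.delete_article"]),
    ("menu", ["wechat_django.delete_menu"]),
    ("messagehandler", ["wechat_django.delete_messagehandler", "wechat_django.add_reply",
      "wechat_django.change_reply", "wechat_django.delete_reply", "wechat_django.add_rule",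
      "wechat_django.change_rule", "wechat_django.delete_rule"]) ]

-- fuel bounds the recursion depth only (a totality guard; depth ≤ 3 on every input since the dict is fixed)
def goA (fuel : Nat) (appname : String) (permission : Option String) : PySem.Set String :=
  match fuel with
  | 0 => PySem.Set.empty
  | fuel + 1 =>
    let perms : List String :=
      match permission with
      | some p => if p ≠ "" then permission_required.getD p [] else permission_required.keys
      | none => permission_required.keys
    perms.foldl (fun rv perm =>
      if PySem.Str.startswith perm "wechat_django." then PySem.Set.add rv perm
      else PySem.Set.update rv (goA fuel appname (some perm))) PySem.Set.empty

def get_require_perm_names (appname : String) (permission : Option String) : List String :=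
  goA 4 appname permission

-- ===== PORT B =====
-- fuel bounds the number of loop iterations (a totality guard; ≤ 15 on every input since the dict is fixed);
-- the stack is kept head-as-top (Python pushes/pops at the list's end).
def goB (fuel : Nat) (stack : List String) (rv : PySem.Set String) : PySem.Set String :=
  match fuel with
  | 0 => rv
  | fuel + 1 =>
    match stack with
    | [] => rv
    | name :: rest =>
      if PySem.Str.startswith name "wechat_django." then goB fuel rest (PySem.Set.add rv name)
      else goB fuel ((permission_required.getD name []) ++ rest) rv

def get_require_perm_names_alt (appname : String) (permission : Option String) : List String :=
  let seeds : List String :=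
    match permission with
    | some p => if p ≠ "" then permission_required.getD p [] else permission_required.keys
    | none => permission_required.keys
  goB 32 seeds PySem.Set.empty

-- ===== PRECONDITION & SPEC =====
def Spec_get_require_perm_names (appname : String) (permission : Option String) (out : List String) : Prop := out = get_require_perm_names_alt appname permission
instance (appname : String) (permission : Option String) (out : List String) : Decidable (Spec_get_require_perm_names appname permission out) := by unfold Spec_get_require_perm_names; infer_instance

-- ===== CLAIM (what is proved, stated in full; the proofs are below) =====
def Claim_equal_get_require_perm_names : Prop := ∀ (appname : String) (permission : Option String), Dom_get_require_perm_names appname permission → Spec_get_require_perm_names appname permission (get_require_perm_names appname permission)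

-- ===== LEMMAS AND PROOFS =====

lemma unknown_key (p : String) (h1 : p ≠ "material") (h2 : p ≠ "article")
    (h3 : p ≠ "menu") (h4 : p ≠ "messagehandler") :
    permission_required.getD p [] = [] := by
  have e : permission_required.items =
    [ ("material", ["article", "wechat_django.delete_material"]),
      ("article", ["wechat_django.delete_article"]),
      ("menu", ["wechat_django.delete_menu"]),
      ("messagehandler", ["wechat_django.delete_messagehandler", "wechat_django.add_reply",
        "wechat_django.change_reply", "wechat_django.delete_reply", "wechat_django.add_rule",
        "wechat_django.change_rule", "wechat_django.delete_rule"]) ] := by decide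
  have b1 : ("material" == p) = false := by simp [Ne.symm h1]
  have b2 : ("article" == p) = false := by simp [Ne.symm h2]
  have b3 : ("menu" == p) = false := by simp [Ne.symm h3]
  have b4 : ("messagehandler" == p) = false := by simp [Ne.symm h4]
  simp [PySem.Dict.getD, PySem.Dict.get?, e, List.find?, b1, b2, b3, b4]

lemma goA_appname (fuel : Nat) (a b : String) (p : Option String) :
    goA fuel a p = goA fuel b p := by
  induction fuel generalizing p with
  | zero => rfl
  | succ fuel ih =>
    simp only [goA]
    congr 1
    funext rv perm
    rw [ih]

-- ===== VERDICT (by name: the statement is the Claim_ definition above) =====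
theorem get_require_perm_names_spec : Claim_equal_get_require_perm_names := by
  intro appname permission _
  unfold Spec_get_require_perm_names
  have ha : get_require_perm_names appname permission = get_require_perm_names "" permission := by
    unfold get_require_perm_names; exact goA_appname 4 appname "" permission
  have hb : get_require_perm_names_alt appname permission = get_require_perm_names_alt "" permission := rfl
  rw [ha, hb]
  cases permission with
  | none => decide
  | some p =>
    by_cases h0 : p = ""
    · subst h0; decide
    · by_cases h1 : p = "material"
      · subst h1; decide
      · by_cases h2 : p = "article"
        · subst h2; decide
        · by_cases h3 : p = "menu"
          · subst h3; decide
          · by_cases h4 : p = "messagehandler"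
            · subst h4; decide
            · simp [get_require_perm_names, get_require_perm_names_alt, goA, goB, h0,
                unknown_key p h1 h2 h3 h4]
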